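-- pv_equiv track=rewrite | github.com/spinsphotonics/hyperwave-community | hyperwave_community/data_io.py | _build_containment_hierarchy
-- ===== SOURCE A (Python) =====
-- def _winding_number(polygon, point):
--     """Calculate winding number for point-in-polygon test.
--
--     The winding number algorithm determines if a point is inside a polygon
--     by counting how many times the polygon winds around the point.
--
--     Args:
--         polygon: Array of (x,y) coordinates defining the polygon.
--         point: (x,y) coordinate to test.
--
--     Returns:
--         Integer winding number. 0 means point is outside, non-zero means inside.
--     """
--     wn = 0
--     for i in range(len(polygon)):
--         p1 = polygon[i]
--         p2 = polygon[(i + 1) % len(polygon)]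
--         if p1[1] <= point[1]:
--             # Use 2D cross product calculation
--             cross_product = (p2[0] - p1[0]) * (point[1] - p1[1]) - (p2[1] - p1[1]) * (point[0] - p1[0])
--             if p2[1] > point[1] and cross_product > 0:
--                 wn += 1
--         elif p2[1] <= point[1]:
--             cross_product = (p2[0] - p1[0]) * (point[1] - p1[1]) - (p2[1] - p1[1]) * (point[0] - p1[0])
--             if cross_product < 0:
--                 wn -= 1
--     return wn
--
-- def _build_containment_hierarchy(polygons):
--     """Build containment hierarchy for nested polygons.
--
--     Determines which polygons are contained within others, essential for
--     correctly handling nested structures with holes.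
--
--     Args:
--         polygons: List of polygon coordinate arrays.
--
--     Returns:
--         Tuple of (roots, hierarchy) where:
--         - roots: List of indices of top-level (non-contained) polygons
--         - hierarchy: Dict mapping polygon index to list of contained indices
--     """
--     hierarchy = {i: [] for i in range(len(polygons))}
--     is_contained = [False] * len(polygons)
--
--     for i in range(len(polygons)):
--         for j in range(len(polygons)):
--             if i == j:
--                 continue
--
--             # Use winding number for robust point-in-polygon test
--             if _winding_number(polygons[j], polygons[i][0]) != 0:
--                 # Check if j is the smallest polygon that contains i
--                 is_smallest_container = True
--                 for k in hierarchy[j]: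
--                     if _winding_number(polygons[k], polygons[i][0]) != 0:
--                         is_smallest_container = False
--                         break
--
--                 if is_smallest_container:
--                     hierarchy[j].append(i)
--                     is_contained[i] = True
--
--     roots = [i for i, contained in enumerate(is_contained) if not contained]
--     return roots, hierarchy
-- ===== SOURCE B (Python) =====
-- def _winding_number(polygon, point):
--     wn = 0
--     for i in range(len(polygon)):
--         p1 = polygon[i]
--         p2 = polygon[(i + 1) % len(polygon)]
--         if p1[1] <= point[1]:
--             cross_product = (p2[0] - p1[0]) * (point[1] - p1[1]) - (p2[1] - p1[1]) * (point[0] - p1[0])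
--             if p2[1] > point[1] and cross_product > 0:
--                 wn += 1
--         elif p2[1] <= point[1]:
--             cross_product = (p2[0] - p1[0]) * (point[1] - p1[1]) - (p2[1] - p1[1]) * (point[0] - p1[0])
--             if cross_product < 0:
--                 wn -= 1
--     return wn
--
--
-- def _build_containment_hierarchy(polygons):
--     n = len(polygons)
--     # One winding test per ordered pair, computed once.
--     inside = [[i != j and _winding_number(polygons[j], polygons[i][0]) != 0
--                for i in range(n)]
--               for j in range(n)]
--     # Sieve: for each container j, repeatedly promote the first remaining
--     # candidate to a child and eliminate every candidate it dominates, instead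
--     # of testing each candidate against the accumulated child list.
--     hierarchy = {}
--     for j in range(n):
--         kids = []
--         candidates = [i for i in range(n) if inside[j][i]]
--         while candidates:
--             head = candidates[0]
--             kids.append(head)
--             candidates = [i for i in candidates[1:] if not inside[head][i]]
--         hierarchy[j] = kids
--     contained = {i for kids in hierarchy.values() for i in kids}
--     roots = [i for i in range(n) if i not in contained]
--     return roots, hierarchy
-- ===== Notes on version B (the rewrite author's own statement) =====
-- stated objective: faster
-- what changed: B computes each pairwise winding test once into an n*n matrix and builds every container's child list by a sieve that promotes the first remaining candidate and eliminates all candidates it dominates, instead of A's triple nested loop that re-runs the O(V) winding test of each candidate against the accumulated child list; roots come from a set of all children rather than a mutated flag array.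
import Mathlib
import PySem

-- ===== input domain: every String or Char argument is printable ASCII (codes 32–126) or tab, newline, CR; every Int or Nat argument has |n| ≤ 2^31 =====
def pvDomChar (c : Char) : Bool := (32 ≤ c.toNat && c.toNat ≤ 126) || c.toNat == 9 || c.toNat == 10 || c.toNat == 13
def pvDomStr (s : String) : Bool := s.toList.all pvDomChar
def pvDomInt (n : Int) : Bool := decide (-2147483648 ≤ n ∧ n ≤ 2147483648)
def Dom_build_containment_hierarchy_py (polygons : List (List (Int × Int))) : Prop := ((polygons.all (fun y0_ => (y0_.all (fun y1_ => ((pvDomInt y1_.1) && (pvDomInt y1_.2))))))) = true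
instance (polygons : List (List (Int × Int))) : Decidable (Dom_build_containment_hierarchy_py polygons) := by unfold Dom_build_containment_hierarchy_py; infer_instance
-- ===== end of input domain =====

-- B computes each winding test once (pairwise matrix) and builds each container's child
-- list by a sieve — promote the first remaining candidate, discard everything it
-- dominates — instead of A's test of every candidate against the accumulated child list
-- inside a triple nested loop (objective: faster).

-- ===== PORT A =====
-- _winding_number (helper of both Python versions; Source B contains it verbatim)
def pvWind (poly : List (Int × Int)) (pt : Int × Int) : Int :=
  (PySem.List.pyRange 0 (PySem.List.len poly) 1).foldl (fun wn i =>
    let p1 := PySem.List.pyGetD poly i (0, 0)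
    let p2 := PySem.List.pyGetD poly (PySem.Int.mod (i + 1) (PySem.List.len poly)) (0, 0)
    if p1.2 ≤ pt.2 then
      if p2.2 > pt.2 ∧ (p2.1 - p1.1) * (pt.2 - p1.2) - (p2.2 - p1.2) * (pt.1 - p1.1) > 0 then wn + 1 else wn
    else if p2.2 ≤ pt.2 then
      if (p2.1 - p1.1) * (pt.2 - p1.2) - (p2.2 - p1.2) * (pt.1 - p1.1) < 0 then wn - 1 else wn
    else wn) 0

-- polygons[i][0] (the point both Pythons test; the default is only reached outside Pre_)
def pvPoint (polygons : List (List (Int × Int))) (i : Int) : Int × Int :=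
  PySem.List.pyGetD (PySem.List.pyGetD polygons i []) 0 (0, 0)

-- body of A's inner `for j` loop
def pvAStep (ps : List (List (Int × Int))) (i : Int)
    (st : PySem.Dict Int (List Int) × List Bool) (j : Int) :
    PySem.Dict Int (List Int) × List Bool :=
  if i = j then st
  else if pvWind (PySem.List.pyGetD ps j []) (pvPoint ps i) ≠ 0 then
    let smallest := (st.1.getD j []).foldl
      (fun fl k => if pvWind (PySem.List.pyGetD ps k []) (pvPoint ps i) ≠ 0 then false else fl) true
    if smallest then (st.1.modify j [] (· ++ [i]), PySem.List.pySetD st.2 i true) else st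
  else st

def build_containment_hierarchy_py (polygons : List (List (Int × Int))) : List Int × (List (Int × List Int)) :=
  let R := PySem.List.pyRange 0 (PySem.List.len polygons) 1
  let hierarchy0 : PySem.Dict Int (List Int) := R.foldl (fun d i => d.insert i []) PySem.Dict.empty
  let contained0 : List Bool := List.replicate polygons.length false
  let st := R.foldl (fun st i => R.foldl (pvAStep polygons i) st) (hierarchy0, contained0)
  let roots := ((PySem.List.enumerate st.2 0).filter (fun p => !p.2)).map (·.1)
  (roots, st.1.items)

-- ===== PORT B =====
-- inside[j][i] of Source B: `i != j and _winding_number(polygons[j], polygons[i][0]) != 0`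
def pvW (ps : List (List (Int × Int))) (j i : Int) : Bool :=
  decide (pvWind (PySem.List.pyGetD ps j []) (pvPoint ps i) ≠ 0)

def pvMat (ps : List (List (Int × Int))) : List (List Bool) :=
  (PySem.List.pyRange 0 (PySem.List.len ps) 1).map (fun j =>
    (PySem.List.pyRange 0 (PySem.List.len ps) 1).map (fun i => decide (i ≠ j) && pvW ps j i))

-- Source B's while-loop sieve: promote the first candidate, drop everything it dominates
def pvSieve (M : List (List Bool)) (cands : List Int) : List Int :=
  match cands with
  | [] => []
  | h :: t =>
      h :: pvSieve M (t.filter (fun i => !(PySem.List.pyGetD (PySem.List.pyGetD M h []) i false)))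
termination_by cands.length
decreasing_by
  simp only [List.length_cons, List.length_unattach]
  exact Nat.lt_succ_of_le (le_trans (List.length_filter_le _ _) (by simp))

def build_containment_hierarchy_py_alt (polygons : List (List (Int × Int))) : List Int × (List (Int × List Int)) :=
  let R := PySem.List.pyRange 0 (PySem.List.len polygons) 1
  let M := pvMat polygons
  let hierarchy := R.foldl (fun (d : PySem.Dict Int (List Int)) j =>
      d.insert j (pvSieve M (R.filter (fun i => PySem.List.pyGetD (PySem.List.pyGetD M j []) i false))))
    PySem.Dict.empty
  let contained : PySem.Set Int := PySem.Set.ofList ((hierarchy.items.map (·.2)).flatMap id)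
  let roots := R.filter (fun i => !(PySem.Set.contains contained i))
  (roots, hierarchy.items)

-- ===== PRECONDITION & SPEC =====
-- Pre_ excludes exactly the inputs where Python A raises IndexError: with at least two
-- polygons, an empty polygon i reaches `polygons[i][0]`.  (Python B raises there too.)
def Pre_build_containment_hierarchy_py (polygons : List (List (Int × Int))) : Prop :=
  1 < polygons.length → ∀ p ∈ polygons, p ≠ []
instance (polygons : List (List (Int × Int))) : Decidable (Pre_build_containment_hierarchy_py polygons) := by
  unfold Pre_build_containment_hierarchy_py; infer_instance

def pvWitness_build_containment_hierarchy_py : (List (List (Int × Int))) :=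
  [[(0, 0), (4, 0), (4, 4), (0, 4)], [(1, 1), (2, 1), (2, 2)]]

def Spec_build_containment_hierarchy_py (polygons : List (List (Int × Int))) (out : List Int × (List (Int × List Int))) : Prop := out = build_containment_hierarchy_py_alt polygons
instance (polygons : List (List (Int × Int))) (out : List Int × (List (Int × List Int))) : Decidable (Spec_build_containment_hierarchy_py polygons out) := by unfold Spec_build_containment_hierarchy_py; infer_instance

-- ===== CLAIM (what is proved, stated in full; the proofs are below) =====
def Claim_equal_build_containment_hierarchy_py : Prop := ∀ (polygons : List (List (Int × Int))), Dom_build_containment_hierarchy_py polygons → Pre_build_containment_hierarchy_py polygons → Spec_build_containment_hierarchy_py polygons (build_containment_hierarchy_py polygons)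

-- ===== LEMMAS AND PROOFS =====

-- canonical model: per-container acceptance step/sequence and fire predicate
def pvStep (ps : List (List (Int × Int))) (j : Int) (L : List Int) (i : Int) : List Int :=
  if decide (i ≠ j) && pvW ps j i && L.all (fun k => !pvW ps k i) then L ++ [i] else L

def pvSeq (ps : List (List (Int × Int))) (j : Int) (I : List Int) : List Int :=
  I.foldl (pvStep ps j) []

def pvFireJ (ps : List (List (Int × Int))) (i j : Int) : Bool :=
  decide (i ≠ j) && pvW ps j i && (pvSeq ps j (PySem.List.pyRange 0 i 1)).all (fun k => !pvW ps k i)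

-- proof-side twin of pvSieve with the raw winding predicate
def pvSieveW (ps : List (List (Int × Int))) (cands : List Int) : List Int :=
  match cands with
  | [] => []
  | h :: t => h :: pvSieveW ps (t.filter (fun i => !pvW ps h i))
termination_by cands.length
decreasing_by
  simp only [List.length_cons, List.length_unattach]
  exact Nat.lt_succ_of_le (le_trans (List.length_filter_le _ _) (by simp))

-- A's contained-array after the first m outer iterations
def pvMaskA (ps : List (List (Int × Int))) (m : Int) : List Bool :=
  (List.range ps.length).map (fun (k : Nat) =>
    decide ((k : Int) < m) && (PySem.List.pyRange 0 ((ps.length : Nat) : Int) 1).any (pvFireJ ps (k : Int)))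

lemma pv_foldl_flag (ps : List (List (Int × Int))) (i : Int) (L : List Int) (b : Bool) :
    L.foldl (fun fl k => if pvWind (PySem.List.pyGetD ps k []) (pvPoint ps i) ≠ 0 then false else fl) b
      = (b && L.all (fun k => !pvW ps k i)) := by
  induction L generalizing b with
  | nil => simp
  | cons a L ih =>
    simp only [List.foldl_cons, ih, List.all_cons]
    by_cases h : pvWind (PySem.List.pyGetD ps a []) (pvPoint ps i) ≠ 0 <;> simp [pvW, h]

lemma pv_find_key {α : Type} (L : List Int) (g : Int → α) (j : Int) (hj : j ∈ L) :
    (L.map (fun k => (k, g k))).find? (fun p => p.1 == j) = some (j, g j) := by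
  induction L with
  | nil => simp at hj
  | cons a L ih =>
    by_cases h : a = j
    · subst h; simp
    · simp only [List.mem_cons] at hj
      rcases hj with h' | h'
      · exact absurd h'.symm h
      · simp [h, ih h']

lemma pv_getD_rng {α : Type} (L : List Int) (g : Int → α) (j : Int) (d : α) (hj : j ∈ L) :
    (PySem.Dict.mk (L.map (fun k => (k, g k)))).getD j d = g j := by
  simp [PySem.Dict.getD, PySem.Dict.get?, pv_find_key L g j hj]

lemma pv_contains_rng {α : Type} (L : List Int) (g : Int → α) (j : Int) :
    (PySem.Dict.mk (L.map (fun k => (k, g k)))).contains j = decide (j ∈ L) := by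
  simp only [PySem.Dict.contains]
  rw [Bool.eq_iff_iff, List.any_eq_true, decide_eq_true_iff]
  constructor
  · rintro ⟨p, hp, h⟩
    simp only [List.mem_map] at hp
    rcases hp with ⟨k, hk, rfl⟩
    simp only [beq_iff_eq] at h
    exact h ▸ hk
  · intro h; exact ⟨(j, g j), List.mem_map_of_mem h, by simp⟩

lemma pv_modify_rng {α : Type} (L : List Int) (g : Int → α) (j : Int) (d : α) (f : α → α) (hj : j ∈ L) :
    (PySem.Dict.mk (L.map (fun k => (k, g k)))).modify j d f
      = PySem.Dict.mk (L.map (fun k => (k, if k = j then f (g j) else g k))) := by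
  apply PySem.Dict.ext
  rw [PySem.Dict.modify, pv_getD_rng L g j d hj,
    PySem.Dict.items_insert_of_contains _ _ (by rw [pv_contains_rng]; simp [hj])]
  simp only [List.map_map]
  apply List.map_congr_left
  intro a _
  by_cases h : a = j <;> simp [h]

lemma pv_set_map_range {α : Type} (N : Nat) (f : Nat → α) (m : Nat) (v : α) (_hm : m < N) :
    ((List.range N).map f).set m v = (List.range N).map (fun k => if k = m then v else f k) := by
  apply List.ext_getElem
  · simp
  · intro k h1 h2
    simp only [List.getElem_set, List.getElem_map, List.getElem_range]
    by_cases h : k = m <;> simp [h, Ne.symm]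

lemma pv_setD_idem (c : List Bool) (i : Int) :
    PySem.List.pySetD (PySem.List.pySetD c i true) i true = PySem.List.pySetD c i true := by
  simp only [PySem.List.pySetD, PySem.List.pySet?]
  cases h : PySem.List.pyIdx? c.length i <;>
    simp [h, List.length_set, List.set_set]

lemma pv_map_false (N : Nat) : (List.range N).map (fun _ => false) = List.replicate N false := by
  rw [List.map_const']; simp

lemma pv_mem_seq (ps : List (List (Int × Int))) (j : Int) (I : List Int) : ∀ (L0 : List Int) (k : Int),
    k ∈ I.foldl (pvStep ps j) L0 → k ∈ L0 ∨ k ∈ I := by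
  induction I with
  | nil => intro L0 k h; exact Or.inl h
  | cons a I ih =>
    intro L0 k h
    simp only [List.foldl_cons] at h
    rcases ih _ k h with h' | h'
    · unfold pvStep at h'
      split at h'
      · rcases List.mem_append.1 h' with h'' | h''
        · exact Or.inl h''
        · simp at h''; simp [h'']
      · exact Or.inl h'
    · simp [h']

lemma pv_mk_congr {α : Type} (L : List Int) (h1 h2 : Int → α) (hh : ∀ k ∈ L, h1 k = h2 k) :
    PySem.Dict.mk (L.map (fun k => (k, h1 k))) = PySem.Dict.mk (L.map (fun k => (k, h2 k))) :=
  PySem.Dict.ext (List.map_congr_left fun k hk => by rw [hh k hk])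

-- one iteration of A's inner loop, on a dict in range-map form
lemma pv_A_step_one (ps : List (List (Int × Int))) (i a : Int) (L : List Int) (haL : a ∈ L)
    (g : Int → List Int) (c : List Bool) :
    pvAStep ps i (PySem.Dict.mk (L.map (fun k => (k, g k))), c) a
      = (PySem.Dict.mk (L.map (fun k => (k, if k = a then pvStep ps a (g a) i else g k))),
         if decide (i ≠ a) && pvW ps a i && (g a).all (fun k => !pvW ps k i)
         then PySem.List.pySetD c i true else c) := by
  unfold pvAStep
  by_cases hia : i = a
  · have hfire : (decide (i ≠ a) && pvW ps a i && (g a).all (fun k => !pvW ps k i)) = false := by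
      simp [hia]
    have hstep : pvStep ps a (g a) i = g a := by unfold pvStep; rw [hfire]; simp
    rw [if_pos hia, hfire]
    simp only [Bool.false_eq_true, if_false]
    rw [Prod.mk.injEq]
    exact ⟨pv_mk_congr L _ _ (fun k _ => by by_cases hk : k = a <;> simp [hk, hstep]), rfl⟩
  · rw [if_neg hia]
    by_cases hw : pvWind (PySem.List.pyGetD ps a []) (pvPoint ps i) ≠ 0
    · rw [if_pos hw]
      simp only [pv_getD_rng L g a [] haL, pv_foldl_flag, Bool.true_and]
      by_cases hall : ((g a).all (fun k => !pvW ps k i)) = true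
      · have hfire : (decide (i ≠ a) && pvW ps a i && (g a).all (fun k => !pvW ps k i)) = true := by
          rw [hall]; simp [hia, pvW, hw]
        have hstep : pvStep ps a (g a) i = g a ++ [i] := by unfold pvStep; rw [hfire]; simp
        rw [if_pos hall, hfire, pv_modify_rng L g a [] _ haL]
        simp only [if_true]
        rw [Prod.mk.injEq]
        exact ⟨pv_mk_congr L _ _ (fun k _ => by by_cases hk : k = a <;> simp [hk, hstep]), rfl⟩
      · have hall' : ((g a).all (fun k => !pvW ps k i)) = false := Bool.eq_false_iff.mpr hall
        have hfire : (decide (i ≠ a) && pvW ps a i && (g a).all (fun k => !pvW ps k i)) = false := by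
          rw [hall']; simp
        have hstep : pvStep ps a (g a) i = g a := by unfold pvStep; rw [hfire]; simp
        rw [if_neg hall, hfire]
        simp only [Bool.false_eq_true, if_false]
        rw [Prod.mk.injEq]
        exact ⟨pv_mk_congr L _ _ (fun k _ => by by_cases hk : k = a <;> simp [hk, hstep]), rfl⟩
    · rw [if_neg hw]
      have hW : pvW ps a i = false := by
        simp only [pvW, decide_eq_false_iff_not]
        exact hw
      have hfire : (decide (i ≠ a) && pvW ps a i && (g a).all (fun k => !pvW ps k i)) = false := by
        rw [hW]; simp
      have hstep : pvStep ps a (g a) i = g a := by unfold pvStep; rw [hfire]; simp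
      rw [hfire]
      simp only [Bool.false_eq_true, if_false]
      rw [Prod.mk.injEq]
      exact ⟨pv_mk_congr L _ _ (fun k _ => by by_cases hk : k = a <;> simp [hk, hstep]), rfl⟩

-- A's inner `for j` loop over a duplicate-free key list
lemma pv_A_inner (ps : List (List (Int × Int))) (i : Int) (J : List Int) (hJ : J.Nodup)
    (L : List Int) (hJL : ∀ j ∈ J, j ∈ L) : ∀ (g : Int → List Int) (c : List Bool),
    J.foldl (pvAStep ps i) (PySem.Dict.mk (L.map (fun k => (k, g k))), c)
      = (PySem.Dict.mk (L.map (fun k => (k, if k ∈ J then pvStep ps k (g k) i else g k))),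
         if J.any (fun j => decide (i ≠ j) && pvW ps j i && (g j).all (fun k => !pvW ps k i))
         then PySem.List.pySetD c i true else c) := by
  induction J with
  | nil => intro g c; simp
  | cons a J ih =>
    intro g c
    have haL : a ∈ L := hJL a (by simp)
    have hJL' : ∀ j ∈ J, j ∈ L := fun j hj => hJL j (by simp [hj])
    have haJ : a ∉ J := (List.nodup_cons.1 hJ).1
    have hJn : J.Nodup := (List.nodup_cons.1 hJ).2
    simp only [List.foldl_cons, pv_A_step_one ps i a L haL g c]
    by_cases hf : (decide (i ≠ a) && pvW ps a i && (g a).all (fun k => !pvW ps k i)) = true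
    · rw [if_pos hf]
      rw [ih hJn hJL' (fun k => if k = a then pvStep ps a (g a) i else g k) (PySem.List.pySetD c i true)]
      have hany : (J.any (fun j => decide (i ≠ j) && pvW ps j i
            && ((if j = a then pvStep ps a (g a) i else g j).all (fun k => !pvW ps k i))))
          = (J.any (fun j => decide (i ≠ j) && pvW ps j i && (g j).all (fun k => !pvW ps k i))) := by
        apply PySem.List.any_congr_mem
        intro j hj
        rw [if_neg (fun h => haJ (by rw [← h]; exact hj))]
      rw [hany]
      have h2 : (if (J.any (fun j => decide (i ≠ j) && pvW ps j i && (g j).all (fun k => !pvW ps k i))) = true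
          then PySem.List.pySetD (PySem.List.pySetD c i true) i true
          else PySem.List.pySetD c i true) = PySem.List.pySetD c i true := by
        split
        · exact pv_setD_idem c i
        · rfl
      rw [h2]
      simp only [List.any_cons, hf, Bool.true_or, if_true]
      rw [Prod.mk.injEq]
      refine ⟨pv_mk_congr L _ _ (fun k _ => ?_), rfl⟩
      by_cases hkJ : k ∈ J
      · have hka : ¬ k = a := fun h => haJ (by rw [← h]; exact hkJ)
        rw [if_pos hkJ, if_pos (List.mem_cons_of_mem a hkJ), if_neg hka]
      · rw [if_neg hkJ]
        by_cases hk : k = a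
        · rw [if_pos hk, if_pos (by simp [hk]), hk]
        · rw [if_neg hk, if_neg (by simp [hk, hkJ])]
    · have hf' := Bool.eq_false_iff.mpr hf
      rw [if_neg hf]
      have hstep : pvStep ps a (g a) i = g a := by unfold pvStep; rw [hf']; simp
      have hmap : PySem.Dict.mk (L.map (fun k => (k, if k = a then pvStep ps a (g a) i else g k)))
          = PySem.Dict.mk (L.map (fun k => (k, g k))) :=
        pv_mk_congr L _ _ (fun k _ => by by_cases hk : k = a <;> simp [hk, hstep])
      rw [hmap, ih hJn hJL' g c]
      simp only [List.any_cons, hf', Bool.false_or]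
      rw [Prod.mk.injEq]
      refine ⟨pv_mk_congr L _ _ (fun k _ => ?_), rfl⟩
      by_cases hkJ : k ∈ J
      · rw [if_pos hkJ, if_pos (List.mem_cons_of_mem a hkJ)]
      · rw [if_neg hkJ]
        by_cases hk : k = a
        · rw [if_pos (by simp [hk]), hk, hstep]
        · rw [if_neg (by simp [hk, hkJ])]

lemma pv_mask_zero (ps : List (List (Int × Int))) : pvMaskA ps 0 = List.replicate ps.length false := by
  unfold pvMaskA
  rw [← pv_map_false ps.length]
  apply List.map_congr_left
  intro k _
  simp

lemma pv_mask_step (ps : List (List (Int × Int))) (m : Nat) (hm : m < ps.length) :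
    (if (PySem.List.pyRange 0 ((ps.length : Nat) : Int) 1).any (pvFireJ ps (m : Int))
     then PySem.List.pySetD (pvMaskA ps (m : Int)) (m : Int) true else pvMaskA ps (m : Int))
      = pvMaskA ps ((m : Int) + 1) := by
  unfold pvMaskA
  split
  next h =>
    rw [PySem.List.pySetD_natCast, pv_set_map_range ps.length _ m true hm]
    apply List.map_congr_left
    intro k _
    by_cases hk : k = m
    · subst hk; rw [if_pos rfl, h]; simp
    · rw [if_neg hk]
      have : decide ((k : Int) < (m : Int)) = decide ((k : Int) < (m : Int) + 1) := by
        rw [decide_eq_decide]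
        constructor
        · omega
        · intro h'
          rcases lt_or_eq_of_le (Int.lt_add_one_iff.mp h') with h'' | h''
          · exact h''
          · exact absurd (by exact_mod_cast h'') hk
      rw [this]
  next h =>
    apply List.map_congr_left
    intro k _
    by_cases hk : k = m
    · subst hk
      rw [Bool.eq_false_iff.mpr h]
      simp
    · have : decide ((k : Int) < (m : Int)) = decide ((k : Int) < (m : Int) + 1) := by
        rw [decide_eq_decide]
        constructor
        · omega
        · intro h'
          rcases lt_or_eq_of_le (Int.lt_add_one_iff.mp h') with h'' | h''
          · exact h''
          · exact absurd (by exact_mod_cast h'') hk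
      rw [this]

-- A's outer loop in canonical form
lemma pv_A_loop (ps : List (List (Int × Int))) (m : Nat) (hm : m ≤ ps.length) :
    (PySem.List.pyRange 0 (m : Int) 1).foldl
        (fun st i => (PySem.List.pyRange 0 ((ps.length : Nat) : Int) 1).foldl (pvAStep ps i) st)
        (PySem.Dict.mk ((PySem.List.pyRange 0 ((ps.length : Nat) : Int) 1).map (fun k => (k, ([] : List Int)))),
         List.replicate ps.length false)
      = (PySem.Dict.mk ((PySem.List.pyRange 0 ((ps.length : Nat) : Int) 1).map
            (fun k => (k, pvSeq ps k (PySem.List.pyRange 0 (m : Int) 1)))),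
         pvMaskA ps m) := by
  induction m with
  | zero =>
    simp only [Nat.cast_zero]
    rw [show PySem.List.pyRange 0 0 1 = [] from PySem.List.pyRange_one_eq_nil le_rfl, pv_mask_zero]
    simp [pvSeq]
  | succ m ih =>
    have hm' : m ≤ ps.length := by omega
    have hcast : ((m + 1 : Nat) : Int) = (m : Int) + 1 := by push_cast; ring
    rw [hcast, PySem.List.pyRange_one_succ_right (by positivity), List.foldl_append,
      ih hm', List.foldl_cons, List.foldl_nil,
      pv_A_inner ps (m : Int) _ (PySem.List.nodup_pyRange_one _ _) _ (fun j hj => hj) _ _,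
      Prod.mk.injEq]
    refine ⟨?_, ?_⟩
    · apply congrArg
      apply List.map_congr_left
      intro k hk
      rw [if_pos hk]
      simp [pvSeq, List.foldl_append]
    · show _ = pvMaskA ps ((m : Int) + 1)
      rw [← pv_mask_step ps m (by omega)]
      rfl

-- the initial dict comprehension {i: [] for i in range(n)}
lemma pv_init_dict (ps : List (List (Int × Int))) :
    (PySem.List.pyRange 0 ((ps.length : Nat) : Int) 1).foldl (fun d i => d.insert i ([] : List Int)) PySem.Dict.empty
      = PySem.Dict.mk ((PySem.List.pyRange 0 ((ps.length : Nat) : Int) 1).map (fun k => (k, ([] : List Int)))) := by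
  apply PySem.Dict.ext
  have := PySem.Dict.items_foldl_insert_fresh (PySem.List.pyRange 0 ((ps.length : Nat) : Int) 1)
    (fun a => a) (fun _ => ([] : List Int)) PySem.Dict.empty
    (fun a _ => by simp) (by simpa using PySem.List.nodup_pyRange_one 0 ((ps.length : Nat) : Int))
  simpa using this

-- B's matrix lookups
lemma pv_mat_get (ps : List (List (Int × Int))) (j i : Int)
    (hj0 : 0 ≤ j) (hj1 : j < ((ps.length : Nat) : Int)) (hi0 : 0 ≤ i) (hi1 : i < ((ps.length : Nat) : Int)) :
    PySem.List.pyGetD (PySem.List.pyGetD (pvMat ps) j []) i false = (decide (i ≠ j) && pvW ps j i) := by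
  unfold pvMat
  rw [show PySem.List.len ps = ((ps.length : Nat) : Int) from by simp]
  rw [PySem.List.pyGetD_map_pyRange_of_nonneg _ _ _ _ hj0 hj1,
    PySem.List.pyGetD_map_pyRange_of_nonneg _ _ _ _ hi0 hi1]

-- A's accumulating loop = append the sieve of the still-live candidates
lemma pv_foldl_eq_sieveW (ps : List (List (Int × Int))) (j : Int) : ∀ (I L0 : List Int),
    I.foldl (pvStep ps j) L0
      = L0 ++ pvSieveW ps (I.filter (fun i =>
          decide (i ≠ j) && pvW ps j i && L0.all (fun k => !pvW ps k i))) := by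
  intro I
  induction I with
  | nil => intro L0; simp [pvSieveW]
  | cons a I ih =>
    intro L0
    simp only [List.foldl_cons, List.filter_cons]
    by_cases hf : (decide (a ≠ j) && pvW ps j a && L0.all (fun k => !pvW ps k a)) = true
    · have hstep : pvStep ps j L0 a = L0 ++ [a] := by unfold pvStep; rw [hf]; simp
      rw [hf, if_pos rfl, hstep, ih (L0 ++ [a]), pvSieveW, List.filter_filter,
        List.append_assoc, List.singleton_append]
      congr 2
      congr 1
      apply List.filter_congr
      intro i _
      simp only [List.all_append, List.all_cons, List.all_nil]
      cases h1 : decide (i ≠ j) <;> cases h2 : pvW ps j i <;>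
        cases h3 : L0.all (fun k => !pvW ps k i) <;> cases h4 : pvW ps a i <;> simp
    · have hf' := Bool.eq_false_iff.mpr hf
      have hstep : pvStep ps j L0 a = L0 := by unfold pvStep; rw [hf']; simp
      rw [hf', hstep, ih L0]
      simp

lemma pv_sieveW_sub_bnd (ps : List (List (Int × Int))) : ∀ (N : Nat) (cands : List Int),
    cands.length ≤ N → ∀ (x : Int), x ∈ pvSieveW ps cands → x ∈ cands := by
  intro N
  induction N with
  | zero =>
    intro cands hlen x hx
    have : cands = [] := List.eq_nil_of_length_eq_zero (Nat.le_zero.1 hlen)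
    subst this
    rw [pvSieveW] at hx
    simp at hx
  | succ N ih =>
    intro cands hlen x hx
    match cands with
    | [] => rw [pvSieveW] at hx; simp at hx
    | h :: t =>
      rw [pvSieveW] at hx
      rcases List.mem_cons.1 hx with h' | h'
      · simp [h']
      · have hlen' : (t.filter (fun i => !pvW ps h i)).length ≤ N :=
          le_trans (List.length_filter_le _ _) (by simpa using hlen)
        exact List.mem_cons_of_mem h (List.mem_of_mem_filter (ih _ hlen' x h'))

lemma pv_sieveW_sub (ps : List (List (Int × Int))) (cands : List Int) (x : Int)
    (hx : x ∈ pvSieveW ps cands) : x ∈ cands :=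
  pv_sieveW_sub_bnd ps cands.length cands le_rfl x hx

-- the two sieves agree on duplicate-free in-range candidate lists
lemma pv_sieve_eq_sieveW_bnd (ps : List (List (Int × Int))) : ∀ (N : Nat) (cands : List Int),
    cands.length ≤ N → cands.Nodup → (∀ i ∈ cands, 0 ≤ i ∧ i < ((ps.length : Nat) : Int)) →
    pvSieve (pvMat ps) cands = pvSieveW ps cands := by
  intro N
  induction N with
  | zero =>
    intro cands hlen _ _
    have : cands = [] := List.eq_nil_of_length_eq_zero (Nat.le_zero.1 hlen)
    subst this
    rw [pvSieve, pvSieveW]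
  | succ N ih =>
    intro cands hlen hnd hrng
    match cands with
    | [] => rw [pvSieve, pvSieveW]
    | h :: t =>
      have hh := hrng h (by simp)
      have hht : h ∉ t := (List.nodup_cons.1 hnd).1
      have hfeq : t.filter (fun i => !(PySem.List.pyGetD (PySem.List.pyGetD (pvMat ps) h []) i false))
          = t.filter (fun i => !pvW ps h i) := by
        apply List.filter_congr
        intro i hi
        have hir := hrng i (by simp [hi])
        rw [pv_mat_get ps h i hh.1 hh.2 hir.1 hir.2]
        have : decide (i ≠ h) = true := by
          simp only [decide_eq_true_iff]
          intro he; exact hht (he ▸ hi)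
        rw [this, Bool.true_and]
      rw [pvSieve, pvSieveW, hfeq]
      congr 1
      exact ih _ (le_trans (List.length_filter_le _ _) (by simpa using hlen))
        ((List.nodup_cons.1 hnd).2.filter _)
        (fun i hi => hrng i (by simp [List.mem_of_mem_filter hi]))

lemma pv_sieve_eq_sieveW (ps : List (List (Int × Int))) (cands : List Int)
    (hnd : cands.Nodup) (hrng : ∀ i ∈ cands, 0 ≤ i ∧ i < ((ps.length : Nat) : Int)) :
    pvSieve (pvMat ps) cands = pvSieveW ps cands :=
  pv_sieve_eq_sieveW_bnd ps cands.length cands le_rfl hnd hrng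

-- membership in a container's final child list = the fire predicate
lemma pv_mem_seq_iff (ps : List (List (Int × Int))) (j i : Int)
    (hi0 : 0 ≤ i) (hi1 : i < ((ps.length : Nat) : Int)) :
    (i ∈ pvSeq ps j (PySem.List.pyRange 0 ((ps.length : Nat) : Int) 1)) ↔ pvFireJ ps i j = true := by
  have hsplit : PySem.List.pyRange 0 ((ps.length : Nat) : Int) 1
      = PySem.List.pyRange 0 i 1 ++ (i :: PySem.List.pyRange (i + 1) ((ps.length : Nat) : Int) 1) := by
    rw [PySem.List.pyRange_one_append 0 i ((ps.length : Nat) : Int) hi0 (le_of_lt hi1)]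
    congr 1
    exact PySem.List.pyRange_one_cons hi1
  set S1 := pvSeq ps j (PySem.List.pyRange 0 i 1) with hS1
  have hS1i : i ∉ S1 := by
    intro h
    rcases pv_mem_seq ps j _ [] i h with h' | h'
    · simp at h'
    · rcases (PySem.List.mem_pyRange_one).1 h' with ⟨_, h2⟩; omega
  have hmid : (PySem.List.pyRange 0 i 1 ++ (i :: PySem.List.pyRange (i + 1) ((ps.length : Nat) : Int) 1)).foldl (pvStep ps j) []
      = (PySem.List.pyRange (i + 1) ((ps.length : Nat) : Int) 1).foldl (pvStep ps j) (pvStep ps j S1 i) := by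
    rw [List.foldl_append, List.foldl_cons]
    rfl
  by_cases hf : pvFireJ ps i j = true
  · have hc : (decide (i ≠ j) && pvW ps j i && S1.all (fun k => !pvW ps k i)) = true := hf
    have hstep : pvStep ps j S1 i = S1 ++ [i] := by unfold pvStep; rw [hc]; simp
    constructor
    · intro _; exact hf
    · intro _
      rw [pvSeq, hsplit, hmid, hstep, pv_foldl_eq_sieveW]
      simp
  · have hc : (decide (i ≠ j) && pvW ps j i && S1.all (fun k => !pvW ps k i)) = false :=
      Bool.eq_false_iff.mpr hf
    have hstep : pvStep ps j S1 i = S1 := by unfold pvStep; rw [hc]; simp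
    constructor
    · intro hmem
      exfalso
      rw [pvSeq, hsplit, hmid, hstep, pv_foldl_eq_sieveW] at hmem
      rcases List.mem_append.1 hmem with h' | h'
      · exact hS1i h'
      · have := List.mem_of_mem_filter (pv_sieveW_sub ps _ i h')
        rcases (PySem.List.mem_pyRange_one).1 this with ⟨h1, _⟩; omega
    · intro h; exact absurd h hf

lemma pv_final (ps : List (List (Int × Int))) :
    build_containment_hierarchy_py ps = build_containment_hierarchy_py_alt ps := by
  simp only [build_containment_hierarchy_py, build_containment_hierarchy_py_alt]
  rw [show PySem.List.len ps = ((ps.length : Nat) : Int) from by simp]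
  rw [pv_init_dict, pv_A_loop ps ps.length le_rfl]
  set n : Int := ((ps.length : Nat) : Int) with hn
  set R := PySem.List.pyRange 0 n 1 with hR
  -- B's per-container child list equals A's
  have hval : ∀ j ∈ R, pvSieve (pvMat ps)
      (R.filter (fun i => PySem.List.pyGetD (PySem.List.pyGetD (pvMat ps) j []) i false))
        = pvSeq ps j R := by
    intro j hj
    rcases (PySem.List.mem_pyRange_one).1 hj with ⟨hj0, hj1⟩
    have hcand : R.filter (fun i => PySem.List.pyGetD (PySem.List.pyGetD (pvMat ps) j []) i false)
        = R.filter (fun i => decide (i ≠ j) && pvW ps j i) := by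
      apply List.filter_congr
      intro i hi
      rcases (PySem.List.mem_pyRange_one).1 hi with ⟨hi0, hi1⟩
      rw [pv_mat_get ps j i hj0 hj1 hi0 hi1]
    rw [hcand, pv_sieve_eq_sieveW ps _ ((PySem.List.nodup_pyRange_one 0 n).filter _)
      (fun i hi => (PySem.List.mem_pyRange_one).1 (List.mem_of_mem_filter hi))]
    have := pv_foldl_eq_sieveW ps j R []
    simp only [List.nil_append, List.all_nil, Bool.and_true] at this
    rw [pvSeq]
    exact this.symm
  -- B's hierarchy dict in range-map form
  have hdict : R.foldl (fun (d : PySem.Dict Int (List Int)) j =>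
      d.insert j (pvSieve (pvMat ps)
        (R.filter (fun i => PySem.List.pyGetD (PySem.List.pyGetD (pvMat ps) j []) i false))))
      PySem.Dict.empty
        = PySem.Dict.mk (R.map (fun k => (k, pvSeq ps k R))) := by
    apply PySem.Dict.ext
    have := PySem.Dict.items_foldl_insert_fresh R (fun a => a)
      (fun j => pvSieve (pvMat ps)
        (R.filter (fun i => PySem.List.pyGetD (PySem.List.pyGetD (pvMat ps) j []) i false)))
      PySem.Dict.empty (fun a _ => by simp)
      (by simpa using PySem.List.nodup_pyRange_one 0 n)
    rw [show ((PySem.Dict.mk (R.map (fun k => (k, pvSeq ps k R)))).items) = R.map (fun k => (k, pvSeq ps k R)) from rfl,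
      this, show (PySem.Dict.empty : PySem.Dict Int (List Int)).items = [] from rfl, List.nil_append]
    exact List.map_congr_left fun j hj => by simp [hval j hj]
  rw [hdict]
  rw [Prod.mk.injEq]
  refine ⟨?_, rfl⟩
  -- roots
  have hflat : ∀ i : Int, 0 ≤ i → i < n →
      ((i ∈ ((PySem.Dict.mk (R.map (fun k => (k, pvSeq ps k R)))).items.map (·.2)).flatMap id)
        ↔ R.any (pvFireJ ps i) = true) := by
    intro i hi0 hi1
    simp only [List.map_map, List.mem_flatMap, List.mem_map, id]
    constructor
    · rintro ⟨l, ⟨j, hj, rfl⟩, hil⟩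
      exact List.any_eq_true.2 ⟨j, hj, (pv_mem_seq_iff ps j i hi0 hi1).1 hil⟩
    · intro h
      rcases List.any_eq_true.1 h with ⟨j, hj, hf⟩
      exact ⟨pvSeq ps j R, ⟨j, hj, rfl⟩, (pv_mem_seq_iff ps j i hi0 hi1).2 hf⟩
  -- A's roots from the mask
  rw [PySem.List.enumerate_eq_map_pyRange _ false]
  rw [show PySem.List.len (pvMaskA ps ps.length) = n from by simp [pvMaskA, hn]]
  rw [List.filter_map, List.map_map]
  have : ∀ i ∈ R, (!PySem.List.pyGetD (pvMaskA ps ps.length) i false)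
      = !(PySem.Set.contains (PySem.Set.ofList
          (((PySem.Dict.mk (R.map (fun k => (k, pvSeq ps k R)))).items.map (·.2)).flatMap id)) i) := by
    intro i hi
    rcases (PySem.List.mem_pyRange_one).1 hi with ⟨hi0, hi1⟩
    congr 1
    have hmask : PySem.List.pyGetD (pvMaskA ps ps.length) i false = R.any (pvFireJ ps i) := by
      unfold pvMaskA
      have hrange : (List.range ps.length).map (fun (k : Nat) =>
            decide ((k : Int) < (ps.length : Int)) && R.any (pvFireJ ps (k : Int)))
          = (List.range ps.length).map (fun (k : Nat) => R.any (pvFireJ ps (k : Int))) := by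
        apply List.map_congr_left
        intro k hk
        simp only [List.mem_range] at hk
        rw [show decide ((k : Int) < (ps.length : Int)) = true from by simp [hk], Bool.true_and]
      rw [hrange]
      have hi' : i = ((i.toNat : Nat) : Int) := by omega
      have hlt : i.toNat < ps.length := by omega
      rw [hi', PySem.List.pyGetD_natCast, PySem.List.getD_map_range _ _ _ _ hlt]
    rw [hmask]
    rw [Bool.eq_iff_iff, PySem.Set.contains_iff, PySem.Set.mem_ofList]
    exact (hflat i hi0 hi1).symm
  rw [List.filter_congr (fun i hi => by
    show ((fun p => !p.2) ∘ (fun j => (j, PySem.List.pyGetD (pvMaskA ps ps.length) j false))) i = _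
    exact this i hi)]
  simp [Function.comp_def]
  rw [← hR]

-- ===== VERDICT (by name: the statement is the Claim_ definition above) =====
theorem build_containment_hierarchy_py_spec : Claim_equal_build_containment_hierarchy_py := by
  intro polygons _ _
  unfold Spec_build_containment_hierarchy_py
  exact pv_final polygons
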